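-- pv_equiv track=rewrite | github.com/ritik1903/pythonvscode | intro.py | lastIndex
-- ===== SOURCE A (Python) =====
-- def lastIndex(a,x):
--       l=len(a)
--       if l==0:
--             return -1
--       if a[l-1]==x:
--             return 0
--       smallerList=a[:-1]
--       smallerListOutput=lastIndex(smallerList,x)
--       if smallerListOutput == -1:
--             return -1
--       else:
--             return smallerListOutput +1
-- ===== SOURCE B (Python) =====
-- def lastIndex(a, x):
--     # single right-to-left scan: return distance from end of last occurrence, else -1
--     k = 0
--     for v in reversed(a):
--         if v == x:
--             return k
--         k += 1
--     return -1
-- ===== Notes on version B (the rewrite author's own statement) =====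
-- stated objective: faster
-- what changed: replaces the recursion that rebuilds a[:-1] at every step (quadratic copying) with a single right-to-left scan counting the offset from the end
import Mathlib
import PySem

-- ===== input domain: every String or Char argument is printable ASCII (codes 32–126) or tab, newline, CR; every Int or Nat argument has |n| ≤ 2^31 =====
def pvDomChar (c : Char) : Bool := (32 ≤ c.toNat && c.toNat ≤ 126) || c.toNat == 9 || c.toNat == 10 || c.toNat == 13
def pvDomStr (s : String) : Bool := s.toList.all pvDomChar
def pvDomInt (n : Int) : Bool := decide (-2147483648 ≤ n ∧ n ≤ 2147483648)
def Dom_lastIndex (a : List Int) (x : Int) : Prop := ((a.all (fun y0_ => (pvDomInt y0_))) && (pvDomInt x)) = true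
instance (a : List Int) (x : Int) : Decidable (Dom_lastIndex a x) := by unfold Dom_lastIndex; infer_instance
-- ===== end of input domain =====

-- B replaces A's recursion (which copies a[:-1] at every step) with one right-to-left scan; objective: faster.

-- ===== PORT A =====
def lastIndex (a : List Int) (x : Int) : Int :=
  let l := a.length
  if l = 0 then -1
  else if PySem.List.pyGet? a ((l : Int) - 1) = some x then 0
  else
    let smallerList := PySem.List.slice a none (some (-1))
    let smallerListOutput := lastIndex smallerList x
    if smallerListOutput = -1 then -1 else smallerListOutput + 1
termination_by a.length
decreasing_by
  simp only [PySem.List.slice_to_neg_one]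
  have : a.length ≠ 0 := by omega
  cases a with
  | nil => simp at this
  | cons h t => simp

-- ===== PORT B =====
def lastIndexGo (x : Int) : List Int → Int → Int
  | [], _ => -1
  | v :: rest, k => if v = x then k else lastIndexGo x rest (k + 1)

def lastIndex_alt (a : List Int) (x : Int) : Int :=
  lastIndexGo x a.reverse 0

-- ===== PRECONDITION & SPEC =====
def Spec_lastIndex (a : List Int) (x : Int) (out : Int) : Prop := out = lastIndex_alt a x
instance (a : List Int) (x : Int) (out : Int) : Decidable (Spec_lastIndex a x out) := by unfold Spec_lastIndex; infer_instance

-- ===== CLAIM (what is proved, stated in full; the proofs are below) =====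
def Claim_equal_lastIndex : Prop := ∀ (a : List Int) (x : Int), Dom_lastIndex a x → Spec_lastIndex a x (lastIndex a x)

-- ===== LEMMAS AND PROOFS =====

-- the scan returns -1 or an index no smaller than the accumulator
theorem lastIndexGo_neg_one_or_ge (x : Int) (l : List Int) :
    ∀ k : Int, lastIndexGo x l k = -1 ∨ k ≤ lastIndexGo x l k := by
  induction l with
  | nil => intro k; left; rfl
  | cons v rest ih =>
    intro k
    rw [lastIndexGo]
    split_ifs with hv
    · right; omega
    · rcases ih (k + 1) with h | h
      · left; exact h
      · right; omega

-- the accumulator only shifts the result when a hit exists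
theorem lastIndexGo_shift (x : Int) (l : List Int) (k : Int) :
    lastIndexGo x l k = if lastIndexGo x l 0 = -1 then -1 else lastIndexGo x l 0 + k := by
  induction l generalizing k with
  | nil => simp [lastIndexGo]
  | cons v rest ih =>
    by_cases hv : v = x
    · simp [lastIndexGo, hv]
    · rw [lastIndexGo, lastIndexGo, if_neg hv, if_neg hv, ih (k + 1), ih (0 + 1)]
      rcases lastIndexGo_neg_one_or_ge x rest 0 with h | h <;> split_ifs <;> omega

theorem lastIndex_eq_alt (a : List Int) (x : Int) : lastIndex a x = lastIndex_alt a x := by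
  induction a using List.reverseRecOn with
  | nil => simp [lastIndex, lastIndex_alt, lastIndexGo]
  | append_singleton as b ih =>
    rw [lastIndex]
    have hlen : (as ++ [b]).length = as.length + 1 := by simp
    have hget : PySem.List.pyGet? (as ++ [b]) (((as.length + 1 : Nat) : Int) - 1) = some b := by
      have : ((as.length + 1 : Nat) : Int) - 1 = ((as.length : Nat) : Int) := by push_cast; ring
      rw [this, PySem.List.pyGet?]
      simp [PySem.List.pyIdx?]
    simp only [hlen, hget, PySem.List.slice_to_neg_one, List.dropLast_concat]
    rw [lastIndex_alt]
    simp only [List.reverse_append, List.reverse_singleton, List.singleton_append]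
    by_cases hb : b = x
    · simp [hb, lastIndexGo]
    · rw [lastIndexGo, if_neg hb]
      rw [lastIndexGo_shift x as.reverse (0 + 1)]
      rw [ih, lastIndex_alt]
      split_ifs with h <;> simp_all

-- ===== VERDICT (by name: the statement is the Claim_ definition above) =====
theorem lastIndex_spec : Claim_equal_lastIndex := by
  intro a x _
  unfold Spec_lastIndex
  exact lastIndex_eq_alt a x
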